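-- pv_equiv track=rewrite | github.com/lijun2005/CVPR26-DreamPRVR | src/Validations/validations.py | get_text_gt
-- ===== SOURCE A (Python) =====
-- from collections import defaultdict
--
-- def get_text_gt(query_metas):
--
--     vid_to_query_indices = defaultdict(list)
--     for i, query_id in enumerate(query_metas):
--         vid_id = query_id.split('#', 1)[0]
--         vid_to_query_indices[vid_id].append(i)
--
--
--     t2t_gt = {}
--     for i, query_id in enumerate(query_metas):
--         vid_id = query_id.split('#', 1)[0]
--         all_indices_for_vid = vid_to_query_indices[vid_id]
--
--         t2t_gt[i] = [idx for idx in all_indices_for_vid if idx != i]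
--
--     return t2t_gt
-- ===== SOURCE B (Python) =====
-- def get_text_gt(query_metas):
--     # Direct pairwise comparison: no grouping table at all.
--     vids = [q.split('#', 1)[0] for q in query_metas]
--     return {i: [j for j, v in enumerate(vids) if v == vids[i] and j != i]
--             for i in range(len(vids))}
-- ===== Notes on version B (the rewrite author's own statement) =====
-- stated objective: alternative
-- what changed: B drops the grouping dict entirely: it precomputes the video ids once and fills each entry by a direct pairwise scan (for every i, the j whose id equals vids[i]), a brute-force comparison algorithm instead of A's hash-grouping two-pass.
import Mathlib
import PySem

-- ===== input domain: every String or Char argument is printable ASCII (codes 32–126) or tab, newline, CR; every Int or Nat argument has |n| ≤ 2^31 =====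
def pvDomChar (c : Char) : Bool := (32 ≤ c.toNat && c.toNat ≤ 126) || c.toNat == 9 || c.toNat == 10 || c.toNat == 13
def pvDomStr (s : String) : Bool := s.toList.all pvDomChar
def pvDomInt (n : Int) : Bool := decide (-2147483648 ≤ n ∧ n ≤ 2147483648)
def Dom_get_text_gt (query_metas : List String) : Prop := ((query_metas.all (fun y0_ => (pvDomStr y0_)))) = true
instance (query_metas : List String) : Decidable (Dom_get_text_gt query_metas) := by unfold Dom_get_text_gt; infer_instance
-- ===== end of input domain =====

-- B drops A's grouping dict: it precomputes the video ids once and fills each entry by a direct pairwise scan (alternative algorithm, not claimed faster).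

-- shared helper: query_id.split('#', 1)[0]  (exact: the separator "#" is nonempty, so splitMax? is some, and a split result is never empty)
def pvVid (q : String) : String := (((PySem.Str.splitMax? q "#" 1).getD []).headD "")

-- ===== PORT A =====
def get_text_gt (query_metas : List String) : List (Int × List Int) :=
  -- defaultdict(list): vid_to_query_indices[vid].append(i) is d.modify vid [] (· ++ [i])
  let vtq := (PySem.List.enumerate query_metas).foldl
      (fun (d : PySem.Dict String (List Int)) p => d.modify (pvVid p.2) [] (· ++ [p.1]))
      PySem.Dict.empty
  let t2t := (PySem.List.enumerate query_metas).foldl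
      (fun (t : PySem.Dict Int (List Int)) p =>
        t.insert p.1 ((vtq.getD (pvVid p.2) []).filter (fun idx => idx != p.1)))
      PySem.Dict.empty
  t2t.items

-- ===== PORT B =====
def get_text_gt_alt (query_metas : List String) : List (Int × List Int) :=
  let vids := query_metas.map pvVid
  -- dict comprehension over range(len(vids)); vids[i] via pyGetD is exact: i is always in range here
  ((PySem.List.pyRange 0 (query_metas.length) 1).foldl
    (fun (d : PySem.Dict Int (List Int)) i =>
      d.insert i (((PySem.List.enumerate vids).filter
        (fun p => p.2 == PySem.List.pyGetD vids i "" && p.1 != i)).map (·.1)))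
    PySem.Dict.empty).items

-- ===== PRECONDITION & SPEC =====
def Spec_get_text_gt (query_metas : List String) (out : List (Int × List Int)) : Prop := out = get_text_gt_alt query_metas
instance (query_metas : List String) (out : List (Int × List Int)) : Decidable (Spec_get_text_gt query_metas out) := by unfold Spec_get_text_gt; infer_instance

-- ===== CLAIM (what is proved, stated in full; the proofs are below) =====
def Claim_equal_get_text_gt : Prop := ∀ (query_metas : List String), Dom_get_text_gt query_metas → Spec_get_text_gt query_metas (get_text_gt query_metas)

-- ===== LEMMAS AND PROOFS =====

def pvGroup (qs : List String) (v : String) : List Int :=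
  ((PySem.List.enumerate qs).filter (fun p => pvVid p.2 == v)).map (·.1)

theorem pv_groups_getD (qs : List String) (v : String) :
    ((PySem.List.enumerate qs).foldl
      (fun (d : PySem.Dict String (List Int)) p => d.modify (pvVid p.2) [] (· ++ [p.1]))
      PySem.Dict.empty).getD v [] = pvGroup qs v := by
  have h := PySem.Dict.getD_foldl_modify_append
    (l := (PySem.List.enumerate qs).map (fun p => (pvVid p.2, p.1)))
    (d := (PySem.Dict.empty : PySem.Dict String (List Int))) (c := v)
  rw [List.foldl_map] at h
  simp only [h, PySem.Dict.getD_empty, List.nil_append, pvGroup, List.filter_map, List.map_map]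
  rfl

theorem pv_enumerate_map {α β : Type} (f : α → β) (l : List α) (s : Int) :
    PySem.List.enumerate (l.map f) s = (PySem.List.enumerate l s).map (fun p => (p.1, f p.2)) := by
  induction l generalizing s with
  | nil => rfl
  | cons x l ih => simp [PySem.List.enumerate_cons, ih]

theorem pv_main (qs : List String) : get_text_gt qs = get_text_gt_alt qs := by
  unfold get_text_gt get_text_gt_alt
  simp only []
  set groups := (PySem.List.enumerate qs).foldl
      (fun (d : PySem.Dict String (List Int)) p => d.modify (pvVid p.2) [] (· ++ [p.1]))
      PySem.Dict.empty with hgroups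
  have hnodupE : ((PySem.List.enumerate qs).map (·.1)).Nodup := by
    rw [PySem.List.map_fst_enumerate]
    exact PySem.List.nodup_pyRange_one _ _
  -- A's second loop: fresh distinct keys, items is the mapped list
  have hA : (((PySem.List.enumerate qs).foldl
      (fun (t : PySem.Dict Int (List Int)) p =>
        t.insert p.1 ((groups.getD (pvVid p.2) []).filter (fun idx => idx != p.1)))
      PySem.Dict.empty)).items
      = (PySem.List.enumerate qs).map (fun p => (p.1, (pvGroup qs (pvVid p.2)).filter (fun idx => idx != p.1))) := by
    rw [PySem.Dict.items_foldl_insert_fresh (PySem.List.enumerate qs) (·.1)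
      (fun p => ((groups.getD (pvVid p.2) []).filter (fun idx => idx != p.1)))
      PySem.Dict.empty (fun a _ => PySem.Dict.contains_empty _) hnodupE]
    simp only [show (PySem.Dict.empty : PySem.Dict Int (List Int)).items = [] from rfl, List.nil_append]
    exact List.map_congr_left (fun p _ => by rw [hgroups, pv_groups_getD])
  rw [hA]
  -- B's dict comprehension: fresh distinct keys over pyRange
  have hB : ((PySem.List.pyRange 0 (qs.length) 1).foldl
      (fun (d : PySem.Dict Int (List Int)) i =>
        d.insert i (((PySem.List.enumerate (qs.map pvVid)).filter
          (fun p => p.2 == PySem.List.pyGetD (qs.map pvVid) i "" && p.1 != i)).map (·.1)))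
      PySem.Dict.empty).items
      = (PySem.List.pyRange 0 (qs.length) 1).map
          (fun i => (i, ((PySem.List.enumerate (qs.map pvVid)).filter
            (fun p => p.2 == PySem.List.pyGetD (qs.map pvVid) i "" && p.1 != i)).map (·.1))) := by
    have h := PySem.Dict.items_foldl_insert_fresh (PySem.List.pyRange 0 (qs.length) 1) id
      (fun i => (((PySem.List.enumerate (qs.map pvVid)).filter
        (fun p => p.2 == PySem.List.pyGetD (qs.map pvVid) i "" && p.1 != i)).map (·.1)))
      PySem.Dict.empty (fun a _ => PySem.Dict.contains_empty _)
      (by simpa using PySem.List.nodup_pyRange_one 0 (qs.length))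
    simp only [id_eq] at h
    rw [h]
    simp [show (PySem.Dict.empty : PySem.Dict Int (List Int)).items = [] from rfl]
  rw [hB]
  -- pointwise comparison
  apply List.ext_getElem?
  intro k
  rw [List.getElem?_map, PySem.List.getElem?_enumerate]
  by_cases hk : k < qs.length
  · rw [PySem.List.getElem?_map_pyRange_zero _ _ _ hk, List.getElem?_eq_getElem hk]
    simp only [Option.map_some, zero_add]
    refine congrArg some (Prod.ext rfl ?_)
    -- vids[k] = pvVid qs[k]
    have hget : PySem.List.pyGetD (qs.map pvVid) (k : Int) "" = pvVid qs[k] := by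
      rw [PySem.List.pyGetD_natCast]
      simp [List.getD_eq_getElem?_getD, hk]
    rw [hget, pv_enumerate_map, pvGroup, List.filter_map, List.filter_map, List.filter_filter]
    simp [Function.comp_def, Bool.and_comm]
  · have h1 : qs[k]? = none := List.getElem?_eq_none (by omega)
    have h2 : ((PySem.List.pyRange 0 (qs.length) 1).map
        (fun i => (i, ((PySem.List.enumerate (qs.map pvVid)).filter
          (fun p => p.2 == PySem.List.pyGetD (qs.map pvVid) i "" && p.1 != i)).map (·.1))))[k]? = none := by
      apply List.getElem?_eq_none
      simp [PySem.List.length_pyRange_one]; omega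
    rw [h1, h2]
    rfl

-- ===== VERDICT (by name: the statement is the Claim_ definition above) =====
theorem get_text_gt_spec : Claim_equal_get_text_gt := by
  intro qs _
  unfold Spec_get_text_gt
  exact pv_main qs
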